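-- pv_equiv track=rewrite | github.com/Sintar0/ObsiRAG | ingest_v2.py | chunk_by_list_items
-- ===== SOURCE A (Python) =====
-- def chunk_by_list_items(lines, list_indices):
--     """
--     Découpe par items de liste pour les fichiers sans titres
--     """
--     chunks = []
--     current_item = []
--
--     for i, line in enumerate(lines):
--         if i in list_indices:
--             if current_item:
--                 item_text = "\n".join(current_item).strip()
--                 if len(item_text) > 30:
--                     chunks.append(item_text)
--             current_item = [line]
--         elif current_item:
--             current_item.append(line)
--         elif line.strip():
--             current_item.append(line)
--
--     if current_item:
--         item_text = "\n".join(current_item).strip()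
--         if len(item_text) > 30:
--             chunks.append(item_text)
--
--     return chunks
-- ===== SOURCE B (Python) =====
-- def chunk_by_list_items(lines, list_indices):
--     bounds = sorted(set(i for i in list_indices if 0 <= i < len(lines)))
--     cuts = [0] + bounds + [len(lines)]
--     chunks = []
--     for a, b in zip(cuts, cuts[1:]):
--         text = "\n".join(lines[a:b]).strip()
--         if len(text) > 30:
--             chunks.append(text)
--     return chunks
-- ===== Notes on version B (the rewrite author's own statement) =====
-- stated objective: simpler
-- what changed: Replaces the line-by-line running-buffer state machine (current_item with blank-line skipping and flush-on-cut) by computing the sorted in-range cut positions once and emitting '\n'.join(lines[a:b]).strip() for each adjacent pair of cuts, relying on the final strip() to absorb the leading-blank handling.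
import Mathlib
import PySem

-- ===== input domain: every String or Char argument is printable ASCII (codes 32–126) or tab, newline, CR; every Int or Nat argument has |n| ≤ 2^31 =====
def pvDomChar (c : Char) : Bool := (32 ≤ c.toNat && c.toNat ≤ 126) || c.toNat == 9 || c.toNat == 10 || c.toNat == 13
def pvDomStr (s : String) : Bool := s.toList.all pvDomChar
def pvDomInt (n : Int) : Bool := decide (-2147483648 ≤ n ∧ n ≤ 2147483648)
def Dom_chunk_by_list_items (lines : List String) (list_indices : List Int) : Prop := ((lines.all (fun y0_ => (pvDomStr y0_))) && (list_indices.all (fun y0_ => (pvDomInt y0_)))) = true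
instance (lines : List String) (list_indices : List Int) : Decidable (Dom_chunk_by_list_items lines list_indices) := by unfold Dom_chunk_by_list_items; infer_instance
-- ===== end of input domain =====

-- B replaces A's running-buffer state machine by cut positions + slices; equivalence proved below (objective: simpler).

-- ===== PORT A =====
-- the body of A's `for i, line in enumerate(lines)` loop, over the state (chunks, current_item)
def pvStepA (list_indices : List Int) (st : List String × List String) (p : Int × String) :
    List String × List String :=
  if list_indices.contains p.1 then
    (if st.2 ≠ [] then
       (let item_text := PySem.Str.strip (PySem.Str.join "\n" st.2)
        if 30 < PySem.Str.len item_text then st.1 ++ [item_text] else st.1)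
     else st.1,
     [p.2])
  else if st.2 ≠ [] then (st.1, st.2 ++ [p.2])
  else if PySem.Str.strip p.2 ≠ "" then (st.1, st.2 ++ [p.2])
  else (st.1, st.2)

def chunk_by_list_items (lines : List String) (list_indices : List Int) : List String :=
  let st := (PySem.List.enumerate lines).foldl (pvStepA list_indices) ([], [])
  if st.2 ≠ [] then
    (let item_text := PySem.Str.strip (PySem.Str.join "\n" st.2)
     if 30 < PySem.Str.len item_text then st.1 ++ [item_text] else st.1)
  else st.1

-- ===== PORT B =====
def chunk_by_list_items_alt (lines : List String) (list_indices : List Int) : List String :=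
  let n : Int := PySem.List.len lines
  let bounds := PySem.List.sorted
    (PySem.Set.ofList (list_indices.filter (fun i => decide (0 ≤ i) && decide (i < n))))
    (fun x => x) false
  let cuts := (0 : Int) :: (bounds ++ [n])
  (cuts.zip (PySem.List.slice cuts (some 1) none)).foldl
    (fun chunks ab =>
      let text := PySem.Str.strip (PySem.Str.join "\n"
        (PySem.List.slice lines (some ab.1) (some ab.2)))
      if 30 < PySem.Str.len text then chunks ++ [text] else chunks)
    []

-- ===== PRECONDITION & SPEC =====
def Spec_chunk_by_list_items (lines : List String) (list_indices : List Int) (out : List String) : Prop := out = chunk_by_list_items_alt lines list_indices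
instance (lines : List String) (list_indices : List Int) (out : List String) : Decidable (Spec_chunk_by_list_items lines list_indices out) := by unfold Spec_chunk_by_list_items; infer_instance

-- ===== CLAIM (what is proved, stated in full; the proofs are below) =====
def Claim_equal_chunk_by_list_items : Prop := ∀ (lines : List String) (list_indices : List Int), Dom_chunk_by_list_items lines list_indices → Spec_chunk_by_list_items lines list_indices (chunk_by_list_items lines list_indices)

-- ===== LEMMAS AND PROOFS =====

-- emit one segment: append its stripped join when longer than 30
def pvEmit (chunks : List String) (seg : List String) : List String :=
  let t := PySem.Str.strip (PySem.Str.join "\n" seg)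
  if 30 < PySem.Str.len t then chunks ++ [t] else chunks

def pvBlank (l : String) : Bool := PySem.Str.strip l == ""

-- A-shaped recursion over relative cut offsets (next segment starts at its cut line)
def pvRefA (chunks : List String) (pre rest : List String) (bs : List Nat) : List String :=
  match bs with
  | [] => pvEmit chunks (pre ++ rest)
  | b :: bs' =>
    pvRefA (pvEmit chunks (pre ++ rest.take b)) [((rest.drop b).headD "")]
      ((rest.drop b).tail) (bs'.map (· - (b + 1)))
termination_by bs.length
decreasing_by simp [List.length_map]

-- same recursion, returning the list of segments
def pvSegsRel (pre rest : List String) (bs : List Nat) : List (List String) :=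
  match bs with
  | [] => [pre ++ rest]
  | b :: bs' =>
    (pre ++ rest.take b) :: pvSegsRel [((rest.drop b).headD "")]
      ((rest.drop b).tail) (bs'.map (· - (b + 1)))
termination_by bs.length
decreasing_by simp [List.length_map]

-- B-shaped segments: slices between adjacent cuts
def pvSegsOf (lines : List String) (cs : List Nat) : List (List String) :=
  ((0 :: cs).zip (cs ++ [lines.length])).map (fun p => (lines.drop p.1).take (p.2 - p.1))

-- the Nat cut positions
def pvCuts (lines : List String) (list_indices : List Int) : List Nat :=
  (List.range lines.length).filter (fun j => list_indices.contains (j : Int))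

-- ---- string lemmas ----
lemma pv_strip_append_of_all (a b : List Char) (h : a.all PySem.Chars.isspace) :
    PySem.Chars.strip (a ++ b) = PySem.Chars.strip b := by
  have ha : List.dropWhile PySem.Chars.isspace a = [] :=
    List.dropWhile_eq_nil_iff.mpr (by simpa [List.all_eq_true] using h)
  simp [PySem.Chars.strip, PySem.Chars.lstrip, List.dropWhile_append, ha]

lemma pv_strip_nil_of_all (a : List Char) (h : a.all PySem.Chars.isspace) :
    PySem.Chars.strip a = [] := by
  have := pv_strip_append_of_all a [] h
  simpa [PySem.Chars.strip, PySem.Chars.lstrip, PySem.Chars.rstrip] using this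

lemma pv_blank_all (l : String) (h : pvBlank l = true) :
    l.toList.all PySem.Chars.isspace = true := by
  have h1 : PySem.Str.strip l = "" := by simpa [pvBlank] using h
  have h2 : PySem.Chars.strip l.toList = [] := by
    have h2' := congrArg String.toList h1
    simpa [PySem.Str.toList_strip] using h2'
  have h3 : ∀ x ∈ PySem.Chars.lstrip l.toList, PySem.Chars.isspace x = true := by
    intro x hx
    have h4 : List.dropWhile PySem.Chars.isspace (PySem.Chars.lstrip l.toList).reverse = [] := by
      have h5 := congrArg List.reverse h2
      simpa [PySem.Chars.strip, PySem.Chars.rstrip] using h5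
    exact List.dropWhile_eq_nil_iff.mp h4 x (by simpa using hx)
  rw [List.all_eq_true]
  intro x hx
  have hx' : x ∈ List.takeWhile PySem.Chars.isspace l.toList
      ++ List.dropWhile PySem.Chars.isspace l.toList := by
    rw [List.takeWhile_append_dropWhile]; exact hx
  rcases List.mem_append.mp hx' with h4 | h4
  · exact List.mem_takeWhile_imp h4
  · exact h3 x (by simpa [PySem.Chars.lstrip] using h4)

lemma pv_strip_join_dropWhile (seg : List String) :
    PySem.Str.strip (PySem.Str.join "\n" (seg.dropWhile pvBlank))
      = PySem.Str.strip (PySem.Str.join "\n" seg) := by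
  induction seg with
  | nil => rfl
  | cons l t ih =>
    by_cases hb : pvBlank l = true
    · rw [List.dropWhile_cons_of_pos hb, ih]
      apply String.toList_inj.mp
      cases t with
      | nil =>
        simp [PySem.Str.toList_strip, PySem.Str.toList_join, PySem.Chars.join_nil,
          PySem.Chars.join_singleton]
        rw [pv_strip_nil_of_all _ (pv_blank_all l hb)]
        simp [PySem.Chars.strip, PySem.Chars.lstrip, PySem.Chars.rstrip]
      | cons x xs =>
        simp only [PySem.Str.toList_strip, PySem.Str.toList_join, List.map_cons,
          PySem.Chars.join_cons_cons]
        have : l.toList ++ "\n".toList ++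
            PySem.Chars.join "\n".toList (x.toList :: xs.map String.toList)
          = (l.toList ++ "\n".toList) ++
            PySem.Chars.join "\n".toList (x.toList :: xs.map String.toList) := by
          simp
        rw [this, pv_strip_append_of_all]
        rw [List.all_append, pv_blank_all l hb]
        decide
    · rw [List.dropWhile_cons_of_neg hb]

lemma pvEmit_dropWhile (chunks : List String) (seg : List String) :
    pvEmit chunks (seg.dropWhile pvBlank) = pvEmit chunks seg := by
  simp only [pvEmit, pv_strip_join_dropWhile]

lemma pvEmit_nil (chunks : List String) : pvEmit chunks [] = chunks := by
  have h : PySem.Str.strip (PySem.Str.join "\n" ([] : List String)) = "" := by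
    apply String.toList_inj.mp
    simp [PySem.Str.toList_strip, PySem.Str.toList_join, PySem.Chars.join_nil,
      PySem.Chars.strip, PySem.Chars.lstrip, PySem.Chars.rstrip]
  simp [pvEmit, h, PySem.Str.len_eq]

-- ---- A-side loop lemmas ----
lemma pv_runA (idxs : List Int) (seg : List String) : ∀ (s : Int) (chunks cur : List String),
    (∀ j : Nat, j < seg.length → idxs.contains (s + j) = false) → cur ≠ [] →
    (PySem.List.enumerate seg s).foldl (pvStepA idxs) (chunks, cur) = (chunks, cur ++ seg) := by
  induction seg with
  | nil => intro s chunks cur h hc; simp [PySem.List.enumerate_nil]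
  | cons l t ih =>
    intro s chunks cur h hc
    rw [PySem.List.enumerate_cons, List.foldl_cons]
    have hc0 : s ∉ idxs := by simpa using h 0 (by simp)
    have hstep : pvStepA idxs (chunks, cur) (s, l) = (chunks, cur ++ [l]) := by
      simp [pvStepA, hc0, hc]
    rw [hstep, ih (s + 1) chunks (cur ++ [l]) ?_ (by simp)]
    · simp
    · intro j hj
      have h1 := h (j + 1) (by simpa using Nat.succ_lt_succ hj)
      have h2 : s + 1 + (j : Int) = s + ((j : Nat) + 1 : Nat) := by push_cast; ring
      rw [h2, h1]

lemma pv_runA0 (idxs : List Int) (seg : List String) : ∀ (s : Int) (chunks : List String),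
    (∀ j : Nat, j < seg.length → idxs.contains (s + j) = false) →
    (PySem.List.enumerate seg s).foldl (pvStepA idxs) (chunks, []) = (chunks, seg.dropWhile pvBlank) := by
  induction seg with
  | nil => intro s chunks h; simp [PySem.List.enumerate_nil]
  | cons l t ih =>
    intro s chunks h
    rw [PySem.List.enumerate_cons, List.foldl_cons]
    have hc0 : s ∉ idxs := by simpa using h 0 (by simp)
    have hshift : ∀ j : Nat, j < t.length → idxs.contains (s + 1 + j) = false := by
      intro j hj
      have h1 := h (j + 1) (by simpa using Nat.succ_lt_succ hj)
      have h2 : s + 1 + (j : Int) = s + ((j : Nat) + 1 : Nat) := by push_cast; ring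
      rw [h2, h1]
    by_cases hb : pvBlank l = true
    · have hsl : PySem.Str.strip l = "" := by simpa [pvBlank] using hb
      have hstep : pvStepA idxs (chunks, ([] : List String)) (s, l) = (chunks, []) := by
        simp [pvStepA, hc0, hsl]
      rw [hstep, ih (s + 1) chunks hshift, List.dropWhile_cons_of_pos hb]
    · have hsl : ¬ PySem.Str.strip l = "" := by simpa [pvBlank] using hb
      have hstep : pvStepA idxs (chunks, ([] : List String)) (s, l) = (chunks, [l]) := by
        simp [pvStepA, hc0, hsl]
      rw [hstep, List.dropWhile_cons_of_neg hb,
        pv_runA idxs t (s + 1) chunks [l] hshift (by simp)]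
      simp

def pvFinalA (st : List String × List String) : List String :=
  if st.2 ≠ [] then
    (let item_text := PySem.Str.strip (PySem.Str.join "\n" st.2)
     if 30 < PySem.Str.len item_text then st.1 ++ [item_text] else st.1)
  else st.1

lemma pvFinalA_eq_emit (c cur : List String) : pvFinalA (c, cur) = pvEmit c cur := by
  by_cases h : cur = []
  · subst h; simp [pvFinalA, pvEmit_nil]
  · simp [pvFinalA, pvEmit, h]

lemma pv_foldA_nil (idxs : List Int) (rest : List String) (s : Int) (chunks cur : List String)
    (hch : ∀ j : Nat, j < rest.length → idxs.contains (s + j) = decide (j ∈ ([] : List Nat)))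
    (hc : cur ≠ []) :
    pvFinalA ((PySem.List.enumerate rest s).foldl (pvStepA idxs) (chunks, cur))
      = pvRefA chunks cur rest [] := by
  rw [pv_runA idxs rest s chunks cur (fun j hj => by simpa using hch j hj) hc,
    pvFinalA_eq_emit]
  simp [pvRefA]

lemma pv_foldA_eq_refA_aux (idxs : List Int) : ∀ (N : Nat) (bs : List Nat), bs.length ≤ N →
    ∀ (rest : List String) (s : Int) (chunks cur : List String),
    bs.Pairwise (· < ·) → (∀ b ∈ bs, b < rest.length) →
    (∀ j : Nat, j < rest.length → idxs.contains (s + j) = decide (j ∈ bs)) → cur ≠ [] →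
    pvFinalA ((PySem.List.enumerate rest s).foldl (pvStepA idxs) (chunks, cur))
      = pvRefA chunks cur rest bs := by
  intro N
  induction N with
  | zero =>
    intro bs hN rest s chunks cur _ _ hch hc
    have : bs = [] := List.length_eq_zero_iff.mp (Nat.le_zero.mp hN)
    subst this
    exact pv_foldA_nil idxs rest s chunks cur hch hc
  | succ N ihN =>
    intro bs hN rest s chunks cur hp hb hch hc
    cases bs with
    | nil => exact pv_foldA_nil idxs rest s chunks cur hch hc
    | cons b bs' =>
      have hblt : b < rest.length := hb b (by simp)
      have hall : ∀ x ∈ bs', b < x := (List.pairwise_cons.mp hp).1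
      obtain ⟨line, rest', hdrop⟩ : ∃ y ys, rest.drop b = y :: ys := by
        cases hd : rest.drop b with
        | nil => exact absurd (List.drop_eq_nil_iff.mp hd) (by omega)
        | cons y ys => exact ⟨y, ys, rfl⟩
      have hsplit : rest = rest.take b ++ (line :: rest') := by
        rw [← hdrop, List.take_append_drop]
      have hlen : (rest.take b).length = b := by rw [List.length_take]; omega
      have hrlen : rest.length = b + 1 + rest'.length := by
        conv_lhs => rw [hsplit]
        simp [hlen]; omega
      conv_lhs => rw [hsplit]
      rw [PySem.List.enumerate_append, List.foldl_append,
        pv_runA idxs (rest.take b) s chunks cur ?_ hc, hlen,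
        PySem.List.enumerate_cons, List.foldl_cons]
      · have hcb : (s + (b : Int)) ∈ idxs := by
          have h1 := hch b hblt
          rw [← List.contains_iff_mem, h1]
          simp
        have hne : cur ++ rest.take b ≠ [] := by simp [hc]
        have hstep : pvStepA idxs (chunks, cur ++ rest.take b) (s + (b : Int), line)
            = (pvEmit chunks (cur ++ rest.take b), [line]) := by
          simp [pvStepA, hcb, hne, pvEmit]
        rw [hstep,
          ihN (bs'.map (· - (b + 1))) (by simpa using Nat.lt_succ_iff.mp (by simpa using hN))
            rest' (s + (b : Int) + 1) (pvEmit chunks (cur ++ rest.take b)) [line] ?_ ?_ ?_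
            (by simp)]
        · conv_rhs => rw [pvRefA]
          rw [hdrop]
          simp
        · rw [List.pairwise_map]
          refine ((List.pairwise_cons.mp hp).2).imp_of_mem ?_
          intro a c ha hc' h
          have := hall a ha
          omega
        · intro x hx
          obtain ⟨c, hcmem, rfl⟩ := List.mem_map.mp hx
          have hc1 := hall c hcmem
          have hc2 := hb c (by simp [hcmem])
          omega
        · intro j hj
          have h1 := hch (b + 1 + j) (by omega)
          have h2 : s + (b : Int) + 1 + (j : Nat) = s + ((b + 1 + j : Nat) : Int) := by
            push_cast; ring
          rw [h2, h1]
          have hiff : (b + 1 + j ∈ b :: bs') ↔ j ∈ bs'.map (· - (b + 1)) := by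
            simp only [List.mem_cons, List.mem_map]
            constructor
            · rintro (h3 | h3)
              · omega
              · exact ⟨b + 1 + j, h3, by omega⟩
            · rintro ⟨c, hcmem, rfl⟩
              have := hall c hcmem
              right
              have h4 : b + 1 + (c - (b + 1)) = c := by omega
              rw [h4]
              exact hcmem
          exact decide_eq_decide.mpr hiff
      · intro j hj
        rw [hlen] at hj
        have h1 := hch j (by omega)
        have hnot : j ∉ b :: bs' := by
          simp only [List.mem_cons]
          rintro (rfl | hx)
          · omega
          · exact absurd (hall j hx) (by omega)
        rw [h1]
        simpa using hnot

lemma pv_foldA_eq_refA (idxs : List Int) (bs : List Nat)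
    (rest : List String) (s : Int) (chunks cur : List String)
    (hp : bs.Pairwise (· < ·)) (hb : ∀ b ∈ bs, b < rest.length)
    (hch : ∀ j : Nat, j < rest.length → idxs.contains (s + j) = decide (j ∈ bs))
    (hc : cur ≠ []) :
    pvFinalA ((PySem.List.enumerate rest s).foldl (pvStepA idxs) (chunks, cur))
      = pvRefA chunks cur rest bs :=
  pv_foldA_eq_refA_aux idxs bs.length bs le_rfl rest s chunks cur hp hb hch hc

lemma pvCuts_pairwise (lines : List String) (idxs : List Int) :
    (pvCuts lines idxs).Pairwise (· < ·) := by
  unfold pvCuts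
  exact List.Pairwise.sublist List.filter_sublist List.pairwise_lt_range

lemma pvCuts_lt (lines : List String) (idxs : List Int) :
    ∀ c ∈ pvCuts lines idxs, c < lines.length := by
  intro c hcm
  have := (List.mem_filter.mp hcm).1
  simpa [List.mem_range] using this

lemma pv_A_eq_refA (lines : List String) (idxs : List Int) :
    chunk_by_list_items lines idxs = pvRefA [] [] lines (pvCuts lines idxs) := by
  have hchar : ∀ j : Nat, j < lines.length →
      idxs.contains ((0 : Int) + j) = decide (j ∈ pvCuts lines idxs) := by
    intro j hj
    rw [zero_add]
    by_cases hmem : ((j : Nat) : Int) ∈ idxs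
    · rw [decide_eq_true (show j ∈ pvCuts lines idxs by
        simp [pvCuts, List.mem_filter, List.mem_range, hj, List.contains_iff_mem, hmem])]
      exact List.contains_iff_mem.mpr hmem
    · have h1 : idxs.contains ((j : Nat) : Int) = false := by
        cases hcb : idxs.contains ((j : Nat) : Int)
        · rfl
        · exact absurd (List.contains_iff_mem.mp hcb) hmem
      rw [h1, decide_eq_false]
      intro hcm
      exact hmem (List.contains_iff_mem.mp (List.mem_filter.mp hcm).2)
  have h0 : chunk_by_list_items lines idxs
      = pvFinalA ((PySem.List.enumerate lines).foldl (pvStepA idxs) ([], [])) := rfl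
  cases hcs : pvCuts lines idxs with
  | nil =>
    rw [hcs] at hchar
    rw [h0, pv_runA0 idxs lines 0 [] (fun j hj => by simpa using hchar j hj),
      pvFinalA_eq_emit, pvEmit_dropWhile]
    simp [pvRefA]
  | cons c cs' =>
    have hp := pvCuts_pairwise lines idxs
    have hb := pvCuts_lt lines idxs
    rw [hcs] at hchar hp hb
    have hclt : c < lines.length := hb c (by simp)
    have hall : ∀ x ∈ cs', c < x := (List.pairwise_cons.mp hp).1
    obtain ⟨line, rest', hdrop⟩ : ∃ y ys, lines.drop c = y :: ys := by
      cases hd : lines.drop c with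
      | nil => exact absurd (List.drop_eq_nil_iff.mp hd) (by omega)
      | cons y ys => exact ⟨y, ys, rfl⟩
    have hsplit : lines = lines.take c ++ (line :: rest') := by
      rw [← hdrop, List.take_append_drop]
    have hlen : (lines.take c).length = c := by rw [List.length_take]; omega
    have hrlen : lines.length = c + 1 + rest'.length := by
      conv_lhs => rw [hsplit]
      simp [hlen]; omega
    rw [h0]
    conv_lhs => rw [hsplit]
    rw [PySem.List.enumerate_append, List.foldl_append,
      pv_runA0 idxs (lines.take c) 0 [] ?_, hlen,
      PySem.List.enumerate_cons, List.foldl_cons]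
    · have hcb : ((0 : Int) + (c : Int)) ∈ idxs := by
        have h1 := hchar c hclt
        simp only [List.mem_cons, true_or, decide_eq_true_eq] at h1 ⊢
        rw [← List.contains_iff_mem, h1]
        simp
      have hcb' : ((c : Int)) ∈ idxs := by simpa using hcb
      set cur0 := (lines.take c).dropWhile pvBlank with hcur0
      have hstep : pvStepA idxs (([] : List String), cur0) ((0 : Int) + (c : Int), line)
          = (pvEmit [] cur0, [line]) := by
        by_cases h : cur0 = []
        · simp [pvStepA, hcb', h, pvEmit_nil]
        · simp [pvStepA, hcb', h, pvEmit]
      rw [hstep, hcur0, pvEmit_dropWhile,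
        pv_foldA_eq_refA idxs (cs'.map (· - (c + 1))) rest' ((0 : Int) + (c : Int) + 1)
          (pvEmit [] (lines.take c)) [line] ?_ ?_ ?_ (by simp)]
      · conv_rhs => rw [pvRefA]
        rw [hdrop]
        simp
      · rw [List.pairwise_map]
        refine ((List.pairwise_cons.mp hp).2).imp_of_mem ?_
        intro a d ha hd h
        have := hall a ha
        omega
      · intro x hx
        obtain ⟨d, hdm, rfl⟩ := List.mem_map.mp hx
        have hd1 := hall d hdm
        have hd2 := hb d (by simp [hdm])
        omega
      · intro j hj
        have h1 := hchar (c + 1 + j) (by omega)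
        have h2 : (0 : Int) + (c : Int) + 1 + (j : Nat) = (0 : Int) + ((c + 1 + j : Nat) : Int) := by
          push_cast; ring
        rw [h2, h1]
        have hiff : (c + 1 + j ∈ c :: cs') ↔ j ∈ cs'.map (· - (c + 1)) := by
          simp only [List.mem_cons, List.mem_map]
          constructor
          · rintro (h3 | h3)
            · omega
            · exact ⟨c + 1 + j, h3, by omega⟩
          · rintro ⟨d, hdm, rfl⟩
            have := hall d hdm
            right
            have h4 : c + 1 + (d - (c + 1)) = d := by omega
            rw [h4]
            exact hdm
        exact decide_eq_decide.mpr hiff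
    · intro j hj
      rw [hlen] at hj
      have h1 := hchar j (by omega)
      have hnot : j ∉ c :: cs' := by
        simp only [List.mem_cons]
        rintro (rfl | hx)
        · omega
        · exact absurd (hall j hx) (by omega)
      rw [h1]
      simpa using hnot

-- ---- refA → segments ----
lemma pv_refA_eq_foldl_aux : ∀ (N : Nat) (bs : List Nat), bs.length ≤ N →
    ∀ (chunks pre rest : List String),
    pvRefA chunks pre rest bs = (pvSegsRel pre rest bs).foldl pvEmit chunks := by
  intro N
  induction N with
  | zero =>
    intro bs hN chunks pre rest
    have hbs : bs = [] := List.length_eq_zero_iff.mp (Nat.le_zero.mp hN)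
    subst hbs
    simp [pvRefA, pvSegsRel]
  | succ N ihN =>
    intro bs hN chunks pre rest
    cases bs with
    | nil => simp [pvRefA, pvSegsRel]
    | cons b bs' =>
      rw [pvRefA, pvSegsRel, List.foldl_cons]
      exact ihN _ (by simpa using Nat.lt_succ_iff.mp (by simpa using hN)) _ _ _

lemma pv_refA_eq_foldl (bs : List Nat) : ∀ (chunks pre rest : List String),
    pvRefA chunks pre rest bs = (pvSegsRel pre rest bs).foldl pvEmit chunks :=
  pv_refA_eq_foldl_aux bs.length bs le_rfl

lemma pv_segsRel_shift (bs : List Nat) (x : String) (xs : List String)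
    (h : ∀ b ∈ bs, 1 ≤ b) :
    pvSegsRel [] (x :: xs) bs = pvSegsRel [x] xs (bs.map (· - 1)) := by
  cases bs with
  | nil => simp [pvSegsRel]
  | cons b bs' =>
    obtain ⟨b0, rfl⟩ : ∃ b0, b = b0 + 1 := ⟨b - 1, by have := h b (by simp); omega⟩
    have hmap : (bs'.map (· - 1)).map (· - (b0 + 1)) = bs'.map (· - (b0 + 1 + 1)) := by
      rw [List.map_map]
      apply List.map_congr_left
      intro a _
      simp [Function.comp]
      omega
    simp only [List.map_cons, Nat.add_sub_cancel, pvSegsRel, List.take_succ_cons,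
      List.drop_succ_cons, hmap, List.nil_append, List.cons_append, List.singleton_append]

lemma pv_segsRel_eq_segsOf_aux : ∀ (N : Nat) (cs : List Nat), cs.length ≤ N →
    ∀ (lines : List String),
    cs.Pairwise (· < ·) → (∀ c ∈ cs, c < lines.length) →
    pvSegsRel [] lines cs = pvSegsOf lines cs := by
  intro N
  induction N with
  | zero =>
    intro cs hN lines _ _
    have hcs : cs = [] := List.length_eq_zero_iff.mp (Nat.le_zero.mp hN)
    subst hcs
    simp [pvSegsRel, pvSegsOf]
  | succ N ihN =>
    intro cs hN lines hp hb
    cases cs with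
    | nil => simp [pvSegsRel, pvSegsOf]
    | cons c cs' =>
      have hclt : c < lines.length := hb c (by simp)
      have hall : ∀ x ∈ cs', c < x := (List.pairwise_cons.mp hp).1
      obtain ⟨line, rest', hdrop⟩ : ∃ y ys, lines.drop c = y :: ys := by
        cases hd : lines.drop c with
        | nil => exact absurd (List.drop_eq_nil_iff.mp hd) (by omega)
        | cons y ys => exact ⟨y, ys, rfl⟩
      -- step 1: both sides peel the first segment
      rw [pvSegsRel]
      -- the recursive pvSegsRel equals pvSegsRel [] (lines.drop c) (cs'.map (· - c))
      have hshift : pvSegsRel [((lines.drop c).headD "")] ((lines.drop c).tail)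
          (cs'.map (· - (c + 1)))
          = pvSegsRel [] (lines.drop c) (cs'.map (· - c)) := by
        rw [hdrop]
        have h1 := pv_segsRel_shift (cs'.map (· - c)) line rest'
          (by
            intro b hbm
            obtain ⟨d, hdm, rfl⟩ := List.mem_map.mp hbm
            have := hall d hdm
            omega)
        have hmap : (cs'.map (· - c)).map (· - 1) = cs'.map (· - (c + 1)) := by
          rw [List.map_map]
          apply List.map_congr_left
          intro a _
          simp [Function.comp]
          omega
        rw [hmap] at h1
        simpa using h1.symm
      rw [hshift,
        ihN (cs'.map (· - c)) (by simpa using Nat.lt_succ_iff.mp (by simpa using hN))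
          (lines.drop c) ?_ ?_]
      · -- step 2: pvSegsOf of the dropped list equals the mapped tail of pvSegsOf
        have hdl : (lines.drop c).length = lines.length - c := by
          rw [List.length_drop]
        unfold pvSegsOf
        rw [hdl]
        have h0 : (0 :: cs'.map (· - c)) = (c :: cs').map (· - c) := by simp
        have h1 : cs'.map (· - c) ++ [lines.length - c]
            = (cs' ++ [lines.length]).map (· - c) := by simp
        rw [h0, h1, List.zip_map, List.map_map]
        have h2 : ((0 : Nat) :: c :: cs').zip ((c :: cs') ++ [lines.length])
            = (0, c) :: ((c :: cs').zip (cs' ++ [lines.length])) := rfl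
        rw [h2, List.map_cons]
        congr 1
        apply List.map_congr_left
        rintro ⟨a, b⟩ hpmem
        have hp1 : a ∈ c :: cs' := (List.of_mem_zip hpmem).1
        have hcle : c ≤ a := by
          rcases List.mem_cons.mp hp1 with rfl | hx
          · exact le_rfl
          · exact le_of_lt (hall _ hx)
        have h3 : c + (a - c) = a := by omega
        have h4 : b - c - (a - c) = b - a := by omega
        simp only [Function.comp_apply, Prod.map_apply, List.drop_drop, h3, h4]
      · rw [List.pairwise_map]
        refine ((List.pairwise_cons.mp hp).2).imp_of_mem ?_
        intro a d ha hd h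
        have := hall a ha
        omega
      · intro x hx
        obtain ⟨d, hdm, rfl⟩ := List.mem_map.mp hx
        have hd1 := hall d hdm
        have hd2 := hb d (by simp [hdm])
        rw [List.length_drop]
        omega

-- ---- B side ----
lemma pv_segsRel_eq_segsOf (cs : List Nat) : ∀ (lines : List String),
    cs.Pairwise (· < ·) → (∀ c ∈ cs, c < lines.length) →
    pvSegsRel [] lines cs = pvSegsOf lines cs :=
  fun lines hp hb => pv_segsRel_eq_segsOf_aux cs.length cs le_rfl lines hp hb

lemma pv_zip_head {α : Type} (x z : α) (l : List α) :
    (x :: (l ++ [z])).zip (l ++ [z]) = (x :: l).zip (l ++ [z]) := by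
  induction l generalizing x with
  | nil => rfl
  | cons a t ih => simpa using ih a

lemma pv_bounds_eq (lines : List String) (idxs : List Int) :
    PySem.List.sorted
      (PySem.Set.ofList (idxs.filter (fun i => decide (0 ≤ i) && decide (i < PySem.List.len lines))))
      (fun x => x) false = (pvCuts lines idxs).map (Nat.cast : Nat → Int) := by
  apply PySem.List.sorted_eq_of_perm_of_pairwise_lt
  · refine (List.perm_ext_iff_of_nodup ?_ ?_).mpr ?_
    · exact ((List.nodup_range).filter _).map (fun a b h => by exact_mod_cast h)
    · exact PySem.Set.nodup_ofList _
    · intro a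
      simp only [List.mem_map, PySem.Set.mem_ofList, List.mem_filter, pvCuts,
        List.mem_range, List.contains_iff_mem, PySem.List.len_eq, Bool.and_eq_true,
        decide_eq_true_eq]
      constructor
      · rintro ⟨j, ⟨hj, hmem⟩, rfl⟩
        exact ⟨hmem, by omega, by exact_mod_cast hj⟩
      · rintro ⟨hmem, h0, hlt⟩
        refine ⟨a.toNat, ⟨by omega, ?_⟩, by omega⟩
        rw [Int.toNat_of_nonneg h0]
        exact hmem
  · rw [List.pairwise_map]
    exact (pvCuts_pairwise lines idxs).imp (fun h => by exact_mod_cast h)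

lemma pv_B_eq_segsOf (lines : List String) (idxs : List Int) :
    chunk_by_list_items_alt lines idxs = (pvSegsOf lines (pvCuts lines idxs)).foldl pvEmit [] := by
  unfold chunk_by_list_items_alt pvSegsOf
  dsimp only
  rw [PySem.List.slice_from_one, List.tail_cons, pv_bounds_eq]
  have hmap1 : (pvCuts lines idxs).map (Nat.cast : Nat → Int) ++ [PySem.List.len lines]
      = ((pvCuts lines idxs) ++ [lines.length]).map (Nat.cast : Nat → Int) := by
    simp [PySem.List.len_eq]
  rw [hmap1]
  rw [show ((0 : Int) :: ((pvCuts lines idxs ++ [lines.length]).map (Nat.cast : Nat → Int)))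
      = ((0 :: (pvCuts lines idxs ++ [lines.length])).map (Nat.cast : Nat → Int)) from by simp]
  rw [List.zip_map, pv_zip_head, List.foldl_map, List.foldl_map]
  refine congrFun (congrArg (fun f => List.foldl f ([] : List String)) ?_) _
  funext ch p
  cases p with
  | mk a b => simp only [Prod.map_apply, PySem.List.slice_natCast, pvEmit]

-- ===== VERDICT (by name: the statement is the Claim_ definition above) =====
theorem chunk_by_list_items_spec : Claim_equal_chunk_by_list_items := by
  intro lines idxs _
  unfold Spec_chunk_by_list_items
  rw [pv_A_eq_refA, pv_B_eq_segsOf, pv_refA_eq_foldl,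
    pv_segsRel_eq_segsOf _ _ (pvCuts_pairwise _ _) (pvCuts_lt _ _)]
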